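-- pv_equiv track=rewrite | github.com/WuChenxu/WuChenxu.github.io | downloads/code/CRC/crc8_calc_table.py | crc_1byte
-- ===== SOURCE A (Python) =====
-- Polynomial=0x1D
--
-- def crc_1byte(data):
-- 	crc_1byte = data
-- 	for i in range(0,8):
-- 		if (crc_1byte & 0x80):
-- 			crc_1byte <<= 1
-- 			crc_1byte^=Polynomial
-- 		else:
-- 			crc_1byte<<=1
-- 		crc_1byte &= 0xFF
-- 	return crc_1byte
-- ===== SOURCE B (Python) =====
-- Polynomial = 0x1D
--
-- def _build_table():
--     table = []
--     for b in range(256):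
--         c = b
--         for _ in range(8):
--             if c & 0x80:
--                 c = ((c << 1) ^ Polynomial) & 0xFF
--             else:
--                 c = (c << 1) & 0xFF
--         table.append(c)
--     return table
--
-- TABLE = _build_table()
--
-- def crc_1byte(data):
--     return TABLE[data & 0xFF]
-- ===== Notes on version B (the rewrite author's own statement) =====
-- stated objective: faster
-- what changed: The per-call 8-iteration shift/xor bit loop is replaced by a single lookup into a 256-entry table precomputed once at module load (indexed by data & 0xFF).
import Mathlib
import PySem

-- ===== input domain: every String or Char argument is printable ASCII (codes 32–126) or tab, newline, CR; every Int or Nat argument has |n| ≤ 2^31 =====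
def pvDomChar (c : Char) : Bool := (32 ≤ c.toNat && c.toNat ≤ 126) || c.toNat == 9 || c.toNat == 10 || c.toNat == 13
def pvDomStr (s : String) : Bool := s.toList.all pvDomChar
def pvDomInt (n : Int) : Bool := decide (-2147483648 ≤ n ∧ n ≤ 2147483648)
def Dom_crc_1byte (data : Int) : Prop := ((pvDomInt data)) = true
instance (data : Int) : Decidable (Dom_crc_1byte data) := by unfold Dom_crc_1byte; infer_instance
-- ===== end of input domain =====

-- B replaces the per-call 8-iteration bit loop by a single lookup in a 256-entry table
-- built once at module load (same polynomial recurrence, run once per byte value).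

-- ===== PORT A =====
-- literal port of A: crc starts at data; 8 iterations of shift / xor-with-0x1D, masked to a byte
def crc_1byte (data : Int) : Int :=
  (PySem.List.pyRange 0 8 1).foldl
    (fun crc _i =>
      let crc := if PySem.Int.band crc 128 ≠ 0
                 then PySem.Int.bxor (crc <<< (1:Nat)) 29
                 else crc <<< (1:Nat)
      PySem.Int.band crc 255)
    data

-- ===== PORT B =====
-- Source B's _build_table: for each byte value b in range(256), run the 8-step recurrence and append
def crcTable : List Int :=
  (PySem.List.pyRange 0 256 1).foldl
    (fun table b =>
      table ++ [(PySem.List.pyRange 0 8 1).foldl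
        (fun c _i =>
          if PySem.Int.band c 128 ≠ 0
          then PySem.Int.band (PySem.Int.bxor (c <<< (1:Nat)) 29) 255
          else PySem.Int.band (c <<< (1:Nat)) 255)
        b])
    []

-- Source B's crc_1byte: TABLE[data & 0xFF]; the index is always in range (0 ≤ data & 255 < 256
-- = crcTable.length), so pyGet? is always `some` and the `.getD 0` default is never hit.
def crc_1byte_alt (data : Int) : Int :=
  (PySem.List.pyGet? crcTable (PySem.Int.band data 255)).getD 0

-- ===== PRECONDITION & SPEC =====
def Spec_crc_1byte (data : Int) (out : Int) : Prop := out = crc_1byte_alt data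
instance (data : Int) (out : Int) : Decidable (Spec_crc_1byte data out) := by unfold Spec_crc_1byte; infer_instance

-- ===== CLAIM (what is proved, stated in full; the proofs are below) =====
def Claim_equal_crc_1byte : Prop := ∀ (data : Int), Dom_crc_1byte data → Spec_crc_1byte data (crc_1byte data)

-- ===== LEMMAS AND PROOFS =====

theorem nat_and255 (n : Nat) : n &&& 255 = n % 256 := by
  have := Nat.and_two_pow_sub_one_eq_mod n 8
  norm_num at this; omega

theorem pv_band255 (a : Int) : PySem.Int.band a 255 = a % 256 := by
  rcases a with n | m
  · rw [show PySem.Int.band (Int.ofNat n) 255 = ((n &&& 255 : Nat) : Int) by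
      simp [PySem.Int.band]]
    rw [nat_and255]
    have : Int.ofNat n = (n:Int) := rfl
    omega
  · have h : PySem.Int.band (Int.negSucc m) 255 = ((255 - (255 &&& m) : Nat) : Int) := by
      simp [PySem.Int.band, Int.negSucc_eq]
      intro h'
      exact absurd h' (by omega)
    rw [h, Nat.and_comm, nat_and255]
    have := Nat.mod_lt m (show 0 < 256 by norm_num)
    have h2 : Int.negSucc m = -(m+1) := Int.negSucc_eq m
    omega

theorem nat_and128 (n : Nat) : n &&& 128 = 128 * (n / 128 % 2) := by
  have h1 := Nat.and_two_pow n 7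
  have h2 : n.testBit 7 = (n / 128).testBit 0 := by
    have := Nat.testBit_div_two_pow (n := 7) n 0
    simpa using this.symm
  rw [h2, Nat.testBit_zero] at h1
  norm_num at h1
  by_cases h : n / 128 % 2 = 1 <;> simp [h] at h1 <;> omega

theorem pv_band128 (a : Int) : PySem.Int.band a 128 = 128 * ((a / 128) % 2) := by
  rcases a with n | m
  · rw [show PySem.Int.band (Int.ofNat n) 128 = ((n &&& 128 : Nat) : Int) by
      simp [PySem.Int.band]]
    rw [nat_and128]
    have : Int.ofNat n = (n:Int) := rfl
    omega
  · have h : PySem.Int.band (Int.negSucc m) 128 = ((128 - (128 &&& m) : Nat) : Int) := by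
      simp [PySem.Int.band, Int.negSucc_eq]
      intro h'
      exact absurd h' (by omega)
    rw [h, Nat.and_comm, nat_and128]
    have := Nat.mod_lt (m/128) (show 0 < 2 by norm_num)
    have h2 : Int.negSucc m = -(m+1) := Int.negSucc_eq m
    omega

theorem nat_xor_lt (v : Nat) (hv : v < 32) : v ^^^ 29 < 32 := by
  interval_cases v <;> decide
theorem nat_xor31 (w : Nat) (h : w < 32) : (31 - w) ^^^ 29 = 31 - (w ^^^ 29) := by
  interval_cases w <;> decide
theorem nat_xor_split (k v : Nat) (hv : v < 32) : (32*k + v) ^^^ 29 = 32*k + (v ^^^ 29) := by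
  apply Nat.eq_of_testBit_eq
  intro j
  rw [Nat.testBit_xor]
  rw [show 32*k + v = 2^5*k + v by norm_num, Nat.testBit_two_pow_mul_add k hv j]
  rw [show 32*k + (v^^^29) = 2^5*k + (v^^^29) by norm_num,
      Nat.testBit_two_pow_mul_add k (nat_xor_lt v hv) j]
  by_cases hj : j < 5
  · simp [hj, Nat.testBit_xor]
  · have h29 : Nat.testBit 29 j = false := by
      apply Nat.testBit_eq_false_of_lt
      calc (29:Nat) < 2^5 := by norm_num
        _ ≤ 2^j := Nat.pow_le_pow_right (by norm_num) (by omega)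
    simp [hj, h29]
theorem pv_bxor29 (a : Int) :
    PySem.Int.bxor a 29 = a - a % 32 + (((a % 32).toNat ^^^ 29 : Nat) : Int) := by
  rcases a with n | m
  · rw [show PySem.Int.bxor (Int.ofNat n) 29 = ((n ^^^ 29 : Nat) : Int) by
      simp [PySem.Int.bxor]]
    have hofn : Int.ofNat n = (n:Int) := rfl
    have h3 : n ^^^ 29 = 32*(n/32) + (n % 32 ^^^ 29) := by
      conv_lhs => rw [show n = 32*(n/32) + n % 32 by omega]
      exact nat_xor_split _ _ (by omega)
    have hX : ((Int.ofNat n) % 32).toNat = n % 32 := by rw [hofn]; omega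
    rw [hX]
    have hb := nat_xor_lt (n % 32) (by omega)
    omega
  · have h : PySem.Int.bxor (Int.negSucc m) 29 = -((m ^^^ 29 : Nat) : Int) - 1 := by
      simp [PySem.Int.bxor, Int.negSucc_eq]
      intro h'
      exact absurd h' (by omega)
    have h2 : Int.negSucc m = -(m+1:Int) := Int.negSucc_eq m
    have h3 : m ^^^ 29 = 32*(m/32) + (m % 32 ^^^ 29) := by
      conv_lhs => rw [show m = 32*(m/32) + m % 32 by omega]
      exact nat_xor_split _ _ (by omega)
    have hX : ((Int.negSucc m) % 32).toNat = 31 - m % 32 := by rw [h2]; omega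
    rw [h, hX, nat_xor31 _ (by omega)]
    have hb := nat_xor_lt (m % 32) (by omega)
    omega
theorem pv_bxor29_mod (a b : Int) (hab : a % 256 = b % 256) :
    PySem.Int.bxor a 29 % 256 = PySem.Int.bxor b 29 % 256 := by
  rw [pv_bxor29, pv_bxor29]
  have h32 : a % 32 = b % 32 := by omega
  rw [h32]
  generalize (((b % 32).toNat ^^^ 29 : Nat) : Int) = X
  omega

-- A's loop body only depends on the running crc mod 256.
theorem pv_bodyA_mod (c : Int) :
    PySem.Int.band (if PySem.Int.band c 128 ≠ 0
                    then PySem.Int.bxor (c <<< (1:Nat)) 29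
                    else c <<< (1:Nat)) 255
      = PySem.Int.band (if PySem.Int.band (c % 256) 128 ≠ 0
                        then PySem.Int.bxor ((c % 256) <<< (1:Nat)) 29
                        else (c % 256) <<< (1:Nat)) 255 := by
  have hsh : ∀ x : Int, x <<< (1:Nat) = 2 * x := by
    intro x; rw [Int.shiftLeft_eq]; ring
  have hcond : PySem.Int.band c 128 = PySem.Int.band (c % 256) 128 := by
    rw [pv_band128, pv_band128]; omega
  rw [hcond]
  split_ifs with h
  · rw [pv_band255, pv_band255, hsh, hsh]
    exact pv_bxor29_mod _ _ (by omega)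
  · rw [pv_band255, pv_band255, hsh, hsh]; omega

def pvStep (c : Int) : Int :=
  PySem.Int.band (if PySem.Int.band c 128 ≠ 0
                  then PySem.Int.bxor (c <<< (1:Nat)) 29
                  else c <<< (1:Nat)) 255

theorem pv_crc_unfold (d : Int) :
    crc_1byte d = List.foldl (fun c (_ : Int) => pvStep c) d (PySem.List.pyRange 0 8 1) := rfl

theorem pvStep_mod (c : Int) : pvStep c = pvStep (c % 256) := pv_bodyA_mod c

theorem pv_crcA_mod (data : Int) : crc_1byte data = crc_1byte (data % 256) := by
  rw [pv_crc_unfold, pv_crc_unfold,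
      show PySem.List.pyRange 0 8 1 = 0 :: [1, 2, 3, 4, 5, 6, 7] from by decide,
      List.foldl_cons, List.foldl_cons, pvStep_mod data]
  simp only [List.foldl_cons, List.foldl_nil]

set_option maxRecDepth 10000 in
theorem pv_table_chk :
    ∀ n ∈ List.range 256,
      (PySem.List.pyGet? crcTable (n : Int)).getD 0 = crc_1byte (n : Int) := by decide

theorem pv_table_lookup (r : Int) (h0 : 0 ≤ r) (h1 : r < 256) :
    (PySem.List.pyGet? crcTable r).getD 0 = crc_1byte r := by
  have hr : r = ((r.toNat : Nat) : Int) := by omega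
  rw [hr]
  exact pv_table_chk r.toNat (List.mem_range.mpr (by omega))

-- ===== VERDICT (by name: the statement is the Claim_ definition above) =====
theorem crc_1byte_spec : Claim_equal_crc_1byte := by
  intro data _
  unfold Spec_crc_1byte crc_1byte_alt
  rw [pv_band255, pv_table_lookup _ (Int.emod_nonneg _ (by norm_num)) (by omega),
      ← pv_crcA_mod]
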